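-- pv_equiv track=rewrite | github.com/dickermoshe/spot-it-gen | main.py | deck_options
-- ===== SOURCE A (Python) =====
-- def ordinary_points(n):
--     """ordinary points are just pairs (x, y) where x and y
--     are both between 0 and n - 1"""
--     return [(x, y) for x in range(n) for y in range(n)]
--
-- def points_at_infinity(n):
--     """infinite points are just the numbers 0 to n - 1
--     (corresponding to the infinity where lines with that slope meet)
--     and infinity infinity (where vertical lines meet)"""
--     return list(range(n)) + [u"∞"]
--
-- def all_points(n):
--     return ordinary_points(n) + points_at_infinity(n)
--
-- def ordinary_line(m, b, n):
--     """returns the ordinary line through (0, b) with slope m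
--     in the finite projective plan of degree n
--     includes 'infinity m'"""
--     return [(x, (m * x + b) % n) for x in range(n)] + [m]
--
-- def vertical_line(x, n):
--     """returns the vertical line with the specified x-coordinate
--     in the finite projective plane of degree n
--     includes 'infinity infinity'"""
--     return [(x, y) for y in range(n)] + [u"∞"]
--
-- def line_at_infinity(n):
--     """the line at infinity just contains the points at infinity"""
--     return points_at_infinity(n)
--
-- def all_lines(n):
--     return ([ordinary_line(m, b, n) for m in range(n) for b in range(n)] +
--             [vertical_line(x, n) for x in range(n)] +
--             [line_at_infinity(n)])
--
-- def make_deck(n, pics):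
--     points = all_points(n)
--
--     # create a mapping from point to pic
--     mapping = { point : pic
--                 for point, pic in zip(points, pics) }
--
--     # and return the remapped cards
--     return [map(mapping.get, line) for line in all_lines(n)]
--
-- def test_deck(deck):
--     for c in deck:
--         for f in c:
--             if f is None:
--                 return False
--     return True
--
-- def deck_options(faces):
--     face_per_deck_options = []
--     for i in range(3,# Min Face Per Card
--                    9+1,# Max Face Per Card
--                 ):
--         if test_deck(make_deck(i, faces)):
--             face_per_deck_options.append(i)
--     return face_per_deck_options
-- ===== SOURCE B (Python) =====
-- def deck_options(faces):
--     n = len(faces)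
--     return [i for i in range(3, 10) if i * i + i + 1 <= n]
-- ===== Notes on version B (the rewrite author's own statement) =====
-- stated objective: simpler
-- what changed: B drops the whole projective-plane deck construction: a deck of size i is valid exactly when faces covers all i*i+i+1 plane points, so B just compares len(faces) against i*i+i+1 for each i in 3..9.
import Mathlib
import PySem

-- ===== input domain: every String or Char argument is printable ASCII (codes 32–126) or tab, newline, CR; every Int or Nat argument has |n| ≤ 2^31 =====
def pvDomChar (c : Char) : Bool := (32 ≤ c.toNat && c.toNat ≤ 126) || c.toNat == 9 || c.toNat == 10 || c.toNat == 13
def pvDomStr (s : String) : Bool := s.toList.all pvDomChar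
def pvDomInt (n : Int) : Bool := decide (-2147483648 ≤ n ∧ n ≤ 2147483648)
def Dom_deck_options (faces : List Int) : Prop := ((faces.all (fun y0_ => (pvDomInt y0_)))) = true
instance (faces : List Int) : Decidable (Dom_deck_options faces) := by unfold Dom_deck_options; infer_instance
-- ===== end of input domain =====

-- B replaces A's whole projective-plane deck construction by the simpler length test
-- len(faces) >= i*i+i+1 for each i in 3..9 (same result; every plane point lies on some line).

-- ===== PORT A =====
-- Python's heterogeneous "points" ((x,y) pairs, slope ints, "∞") as one inductive type.
inductive Pt where
  | ord : Int → Int → Pt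
  | inf : Int → Pt
  | infinf : Pt
deriving DecidableEq, Repr

def ordinary_points (n : Int) : List Pt :=
  (PySem.List.pyRange 0 n 1).flatMap (fun x => (PySem.List.pyRange 0 n 1).map (fun y => Pt.ord x y))

def points_at_infinity (n : Int) : List Pt :=
  (PySem.List.pyRange 0 n 1).map Pt.inf ++ [Pt.infinf]

def all_points (n : Int) : List Pt := ordinary_points n ++ points_at_infinity n

def ordinary_line (m b n : Int) : List Pt :=
  (PySem.List.pyRange 0 n 1).map (fun x => Pt.ord x (PySem.Int.mod (m * x + b) n)) ++ [Pt.inf m]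

def vertical_line (x n : Int) : List Pt :=
  (PySem.List.pyRange 0 n 1).map (fun y => Pt.ord x y) ++ [Pt.infinf]

def line_at_infinity (n : Int) : List Pt := points_at_infinity n

def all_lines (n : Int) : List (List Pt) :=
  (PySem.List.pyRange 0 n 1).flatMap (fun m => (PySem.List.pyRange 0 n 1).map (fun b => ordinary_line m b n))
  ++ (PySem.List.pyRange 0 n 1).map (fun x => vertical_line x n)
  ++ [line_at_infinity n]

def make_deck (n : Int) (pics : List Int) : List (List (Option Int)) :=
  let points := all_points n
  let mapping : PySem.Dict Pt Int :=
    (points.zip pics).foldl (fun d pv => d.insert pv.1 pv.2) PySem.Dict.empty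
  (all_lines n).map (fun line => line.map (fun p => mapping.get? p))

def test_deck (deck : List (List (Option Int))) : Bool :=
  deck.all (fun c => c.all (fun f => !f.isNone))

def deck_options (faces : List Int) : List Int :=
  (PySem.List.pyRange 3 10 1).foldl
    (fun acc i => if test_deck (make_deck i faces) then acc ++ [i] else acc) []

-- ===== PORT B =====
def deck_options_alt (faces : List Int) : List Int :=
  let n : Int := faces.length
  (PySem.List.pyRange 3 10 1).filter (fun i => decide (i * i + i + 1 ≤ n))

-- ===== PRECONDITION & SPEC =====
def Spec_deck_options (faces : List Int) (out : List Int) : Prop := out = deck_options_alt faces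
instance (faces : List Int) (out : List Int) : Decidable (Spec_deck_options faces out) := by unfold Spec_deck_options; infer_instance

-- ===== CLAIM (what is proved, stated in full; the proofs are below) =====
def Claim_equal_deck_options : Prop := ∀ (faces : List Int), Dom_deck_options faces → Spec_deck_options faces (deck_options faces)

-- ===== LEMMAS AND PROOFS =====

lemma mapFst_zip_eq_take {α β : Type} (P : List α) (f : List β) :
    (P.zip f).map Prod.fst = P.take f.length := by
  induction P generalizing f with
  | nil => simp
  | cons p P ih =>
    cases f with
    | nil => simp
    | cons v f => simp [ih]

-- the mapping dict misses p exactly when p is not among the first len(faces) points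
lemma get?_mapping_eq_none_iff (P : List Pt) (faces : List Int) (p : Pt) :
    ((P.zip faces).foldl (fun d pv => d.insert pv.1 pv.2)
      (PySem.Dict.empty : PySem.Dict Pt Int)).get? p = none ↔ p ∉ P.take faces.length := by
  rw [PySem.Dict.get?_eq_none_iff_not_mem_keys,
      PySem.Dict.keys_foldl_insert_key (P.zip faces) Prod.fst (fun _ pv => pv.2) PySem.Dict.empty,
      PySem.Dict.keys_empty, PySem.Set.update_nil_left, mapFst_zip_eq_take]
  rw [PySem.Set.mem_ofList]

lemma mem_all_points_ord {n x y : Int} (hx : 0 ≤ x ∧ x < n) (hy : 0 ≤ y ∧ y < n) :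
    Pt.ord x y ∈ all_points n := by
  unfold all_points ordinary_points
  refine List.mem_append_left _ ?_
  simp only [List.mem_flatMap, List.mem_map, PySem.List.mem_pyRange_one]
  exact ⟨x, hx, y, hy, rfl⟩

lemma mem_all_points_inf {n m : Int} (hm : 0 ≤ m ∧ m < n) : Pt.inf m ∈ all_points n := by
  unfold all_points points_at_infinity
  refine List.mem_append_right _ (List.mem_append_left _ ?_)
  simp only [List.mem_map, PySem.List.mem_pyRange_one]
  exact ⟨m, hm, rfl⟩

lemma mem_all_points_infinf (n : Int) : Pt.infinf ∈ all_points n := by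
  unfold all_points points_at_infinity
  exact List.mem_append_right _ (List.mem_append_right _ (List.mem_singleton.mpr rfl))

-- every member of every line is a plane point
lemma lines_subset_points {n : Int} (hn : 0 < n) :
    ∀ l ∈ all_lines n, ∀ p ∈ l, p ∈ all_points n := by
  intro l hl p hp
  unfold all_lines at hl
  rcases List.mem_append.mp hl with hl | hl
  · rcases List.mem_append.mp hl with hl | hl
    · -- ordinary lines
      simp only [List.mem_flatMap, List.mem_map, PySem.List.mem_pyRange_one] at hl
      obtain ⟨m, hm, b, _, rfl⟩ := hl
      unfold ordinary_line at hp
      rcases List.mem_append.mp hp with hp | hp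
      · simp only [List.mem_map, PySem.List.mem_pyRange_one] at hp
        obtain ⟨x, hx, rfl⟩ := hp
        exact mem_all_points_ord hx ⟨PySem.Int.mod_nonneg _ hn, PySem.Int.mod_lt _ hn⟩
      · rw [List.mem_singleton.mp hp]
        exact mem_all_points_inf hm
    · -- vertical lines
      simp only [List.mem_map, PySem.List.mem_pyRange_one] at hl
      obtain ⟨x, hx, rfl⟩ := hl
      unfold vertical_line at hp
      rcases List.mem_append.mp hp with hp | hp
      · simp only [List.mem_map, PySem.List.mem_pyRange_one] at hp
        obtain ⟨y, hy, rfl⟩ := hp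
        exact mem_all_points_ord hx hy
      · rw [List.mem_singleton.mp hp]
        exact mem_all_points_infinf n
  · -- line at infinity
    rw [List.mem_singleton.mp hl] at hp
    unfold line_at_infinity points_at_infinity at hp
    rcases List.mem_append.mp hp with hp | hp
    · simp only [List.mem_map, PySem.List.mem_pyRange_one] at hp
      obtain ⟨m, hm, rfl⟩ := hp
      exact mem_all_points_inf hm
    · rw [List.mem_singleton.mp hp]
      exact mem_all_points_infinf n

-- every plane point lies on some line
lemma points_covered {n : Int} :
    ∀ p ∈ all_points n, ∃ l ∈ all_lines n, p ∈ l := by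
  intro p hp
  unfold all_points at hp
  rcases List.mem_append.mp hp with hp | hp
  · -- ordinary point (x, y): lies on the vertical line x
    unfold ordinary_points at hp
    simp only [List.mem_flatMap, List.mem_map, PySem.List.mem_pyRange_one] at hp
    obtain ⟨x, hx, y, hy, rfl⟩ := hp
    refine ⟨vertical_line x n, ?_, ?_⟩
    · unfold all_lines
      refine List.mem_append_left _ (List.mem_append_right _ ?_)
      simp only [List.mem_map, PySem.List.mem_pyRange_one]
      exact ⟨x, hx, rfl⟩
    · unfold vertical_line
      refine List.mem_append_left _ ?_
      simp only [List.mem_map, PySem.List.mem_pyRange_one]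
      exact ⟨y, hy, rfl⟩
  · -- point at infinity: lies on the line at infinity
    refine ⟨line_at_infinity n, ?_, ?_⟩
    · unfold all_lines
      exact List.mem_append_right _ (List.mem_singleton.mpr rfl)
    · exact hp

-- core: A's deck test is exactly the length comparison
lemma test_make_deck {n : Int} (hn : 0 < n) (hnd : (all_points n).Nodup) (faces : List Int) :
    test_deck (make_deck n faces) = decide ((all_points n).length ≤ faces.length) := by
  have hd : make_deck n faces = (all_lines n).map (fun line => line.map (fun p =>
      (((all_points n).zip faces).foldl (fun d pv => d.insert pv.1 pv.2)
        (PySem.Dict.empty : PySem.Dict Pt Int)).get? p)) := rfl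
  rw [hd]
  set D := ((all_points n).zip faces).foldl (fun d pv => d.insert pv.1 pv.2)
      (PySem.Dict.empty : PySem.Dict Pt Int) with hDdef
  have hDnone : ∀ p : Pt, D.get? p = none ↔ p ∉ (all_points n).take faces.length :=
    fun p => get?_mapping_eq_none_iff (all_points n) faces p
  unfold test_deck
  by_cases h : (all_points n).length ≤ faces.length
  · simp only [h, decide_true, List.all_eq_true, List.mem_map]
    rintro c ⟨l, hl, rfl⟩ f hf
    rw [List.mem_map] at hf
    obtain ⟨p, hp, rfl⟩ := hf
    have hne : D.get? p ≠ none := by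
      rw [Ne, hDnone, List.take_of_length_le h]
      exact fun hcon => hcon (lines_subset_points hn l hl p hp)
    simp only [Bool.not_eq_true', Option.isNone_eq_false_iff, Option.isSome_iff_ne_none]
    exact hne
  · simp only [h, decide_false]
    have h' := Nat.lt_of_not_le h
    have hpmem : (all_points n)[faces.length] ∈ all_points n := List.getElem_mem h'
    obtain ⟨l, hl, hpl⟩ := points_covered _ hpmem
    have hnone : D.get? ((all_points n)[faces.length]) = none := by
      rw [hDnone]
      intro hmem
      rw [List.mem_take_iff_getElem] at hmem
      obtain ⟨j, hj, hje⟩ := hmem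
      have := hnd.getElem_inj_iff.mp hje
      omega
    rw [List.all_eq_false]
    refine ⟨l.map (fun q => D.get? q), List.mem_map_of_mem hl, ?_⟩
    rw [Bool.not_eq_true, List.all_eq_false]
    exact ⟨D.get? ((all_points n)[faces.length]), List.mem_map_of_mem hpl, by simp [hnone]⟩

-- concrete Nodup facts for the seven candidate sizes
lemma nodups : (all_points 3).Nodup ∧ (all_points 4).Nodup ∧ (all_points 5).Nodup ∧
    (all_points 6).Nodup ∧ (all_points 7).Nodup ∧ (all_points 8).Nodup ∧ (all_points 9).Nodup := by
  decide

-- ===== VERDICT (by name: the statement is the Claim_ definition above) =====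
theorem deck_options_spec : Claim_equal_deck_options := by
  intro faces _
  unfold Spec_deck_options deck_options deck_options_alt
  obtain ⟨nd3, nd4, nd5, nd6, nd7, nd8, nd9⟩ := nodups
  have hr : PySem.List.pyRange 3 10 1 = [3, 4, 5, 6, 7, 8, 9] := by decide
  rw [hr]
  rw [PySem.List.foldl_congr_mem _ _
    (fun acc i => if decide ((i * i + i + 1 : Int) ≤ (faces.length : Int)) = true then acc ++ [i] else acc) _ ?_]
  · rw [show (fun acc i => if decide ((i * i + i + 1 : Int) ≤ (faces.length : Int)) = true then acc ++ [i] else acc)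
        = (fun acc i => if (fun j => decide ((j * j + j + 1 : Int) ≤ (faces.length : Int))) i = true
            then acc ++ [id i] else acc) from rfl,
      PySem.List.foldl_append_if]
    simp only [List.nil_append, List.map_id]
  · intro acc i hi
    have key : test_deck (make_deck i faces) = decide ((i * i + i + 1 : Int) ≤ (faces.length : Int)) := by
      fin_cases hi
      · rw [test_make_deck (by norm_num) nd3, show (all_points 3).length = 13 from by decide]
        exact decide_eq_decide.mpr (by omega)
      · rw [test_make_deck (by norm_num) nd4, show (all_points 4).length = 21 from by decide]
        exact decide_eq_decide.mpr (by omega)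
      · rw [test_make_deck (by norm_num) nd5, show (all_points 5).length = 31 from by decide]
        exact decide_eq_decide.mpr (by omega)
      · rw [test_make_deck (by norm_num) nd6, show (all_points 6).length = 43 from by decide]
        exact decide_eq_decide.mpr (by omega)
      · rw [test_make_deck (by norm_num) nd7, show (all_points 7).length = 57 from by decide]
        exact decide_eq_decide.mpr (by omega)
      · rw [test_make_deck (by norm_num) nd8, show (all_points 8).length = 73 from by decide]
        exact decide_eq_decide.mpr (by omega)
      · rw [test_make_deck (by norm_num) nd9, show (all_points 9).length = 91 from by decide]
        exact decide_eq_decide.mpr (by omega)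
    rw [key]
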